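-- pv_equiv track=rewrite | github.com/Vedant-Pophali/AQC_System | src/policy/policy_engine.py | compute_ci
-- ===== SOURCE A (Python) =====
-- CI_POLICY = {
--     "PASSED": 0,
--     "WARNING": 0,
--     "REJECTED": 2,
--     "ERROR": 3
-- }
--
-- def compute_ci(modules_effective_status):
--     """
--     Compute final CI exit code.
--     """
--     worst = "PASSED"
--
--     for status in modules_effective_status.values():
--         if status in ("ERROR", "REJECTED"):
--             worst = "ERROR"
--             break
--         if status == "WARNING" and worst == "PASSED":
--             worst = "WARNING"
--
--     return worst, CI_POLICY[worst]
-- ===== SOURCE B (Python) =====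
-- CI_POLICY = {
--     "PASSED": 0,
--     "WARNING": 0,
--     "REJECTED": 2,
--     "ERROR": 3
-- }
--
-- def compute_ci(modules_effective_status):
--     """Compute final CI exit code by tier-wise presence checks."""
--     vals = modules_effective_status.values()
--     if any(st in ("ERROR", "REJECTED") for st in vals):
--         worst = "ERROR"
--     elif any(st == "WARNING" for st in vals):
--         worst = "WARNING"
--     else:
--         worst = "PASSED"
--     return worst, CI_POLICY[worst]
-- ===== Notes on version B (the rewrite author's own statement) =====
-- stated objective: simpler
-- what changed: Replaces A's stateful scan with an early break and a 'worst' accumulator by two declarative any() presence checks over the status tiers.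
import Mathlib
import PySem

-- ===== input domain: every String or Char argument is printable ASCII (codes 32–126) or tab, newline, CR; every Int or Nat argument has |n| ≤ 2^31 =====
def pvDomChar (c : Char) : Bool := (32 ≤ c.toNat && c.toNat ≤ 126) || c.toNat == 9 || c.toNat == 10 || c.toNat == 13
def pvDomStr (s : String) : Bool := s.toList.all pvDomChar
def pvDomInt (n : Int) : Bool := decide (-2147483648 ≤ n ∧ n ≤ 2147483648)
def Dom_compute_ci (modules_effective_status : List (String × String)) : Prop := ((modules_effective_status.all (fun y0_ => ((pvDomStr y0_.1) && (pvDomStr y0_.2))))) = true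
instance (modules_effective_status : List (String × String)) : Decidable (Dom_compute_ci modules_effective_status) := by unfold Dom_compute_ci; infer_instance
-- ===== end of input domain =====

-- B replaces A's stateful early-break scan by tier-wise any() presence checks (objective: simpler).


-- CI_POLICY literal (distinct keys, so the Dict is the items list verbatim)
def pvCIPolicy : PySem.Dict String Int :=
  PySem.Dict.mk [("PASSED", 0), ("WARNING", 0), ("REJECTED", 2), ("ERROR", 3)]

-- ===== PORT A =====
-- A's for-loop over .values() with the break: structural recursion carrying the 'worst' accumulator.
def computeCiLoop (worst : String) (vs : List String) : String :=
  match vs with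
  | [] => worst
  | status :: rest =>
      if status == "ERROR" || status == "REJECTED" then "ERROR"
      else
        let worst' := if status == "WARNING" && worst == "PASSED" then "WARNING" else worst
        computeCiLoop worst' rest

def compute_ci (modules_effective_status : List (String × String)) : String × Int :=
  -- .values(): the dict argument has unique keys, so its values are the pairs' second components
  let worst := computeCiLoop "PASSED" (modules_effective_status.map (·.2))
  -- CI_POLICY[worst]: worst is always a key of pvCIPolicy, so getD never uses the default
  (worst, pvCIPolicy.getD worst 0)

-- ===== PORT B =====
def compute_ci_alt (modules_effective_status : List (String × String)) : String × Int :=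
  let vals := modules_effective_status.map (·.2)
  let worst :=
    if vals.any (fun st => st == "ERROR" || st == "REJECTED") then "ERROR"
    else if vals.any (fun st => st == "WARNING") then "WARNING"
    else "PASSED"
  (worst, pvCIPolicy.getD worst 0)

-- ===== PRECONDITION & SPEC =====
def Spec_compute_ci (modules_effective_status : List (String × String)) (out : String × Int) : Prop := out = compute_ci_alt modules_effective_status
instance (modules_effective_status : List (String × String)) (out : String × Int) : Decidable (Spec_compute_ci modules_effective_status out) := by unfold Spec_compute_ci; infer_instance

-- ===== CLAIM (what is proved, stated in full; the proofs are below) =====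
def Claim_equal_compute_ci : Prop := ∀ (modules_effective_status : List (String × String)), Dom_compute_ci modules_effective_status → Spec_compute_ci modules_effective_status (compute_ci modules_effective_status)

-- ===== LEMMAS AND PROOFS =====

lemma computeCiLoop_warning (vs : List String) :
    computeCiLoop "WARNING" vs =
      (if vs.any (fun st => st == "ERROR" || st == "REJECTED") then "ERROR" else "WARNING") := by
  induction vs with
  | nil => simp [computeCiLoop]
  | cons s rest ih =>
      simp only [computeCiLoop, List.any_cons]
      by_cases h : (s == "ERROR" || s == "REJECTED") = true
      · simp [h]
      · simp [h, ih]

lemma computeCiLoop_passed (vs : List String) :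
    computeCiLoop "PASSED" vs =
      (if vs.any (fun st => st == "ERROR" || st == "REJECTED") then "ERROR"
       else if vs.any (fun st => st == "WARNING") then "WARNING" else "PASSED") := by
  induction vs with
  | nil => simp [computeCiLoop]
  | cons s rest ih =>
      simp only [computeCiLoop, List.any_cons]
      by_cases h : (s == "ERROR" || s == "REJECTED") = true
      · simp [h]
      · by_cases hw : (s == "WARNING") = true
        · simp [h, hw, computeCiLoop_warning rest]
        · simp [h, hw, ih]

-- ===== VERDICT (by name: the statement is the Claim_ definition above) =====
theorem compute_ci_spec : Claim_equal_compute_ci := by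
  intro l _
  show _ = _
  simp only [compute_ci, compute_ci_alt, computeCiLoop_passed]
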